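-- pv_equiv track=rewrite | github.com/alexsandresilva777-maker/smartlarder-app | barcode_lookup.py | _categoria
-- ===== SOURCE A (Python) =====
-- def _categoria(cats: str) -> str:
--     if not cats:
--         return "Alimentos"
--     txt = " ".join(p.split(":")[-1] for p in cats.replace(",",";").split(";")).lower()
--     if any(w in txt for w in ["bebida","drink","juice","soda","refrigerante","suco","agua",
--                                "cerveja","vinho","leite","cha","cafe","iogurte","achocolatado"]):
--         return "Bebidas"
--     if any(w in txt for w in ["higiene","sabonete","shampoo","creme","dental","desodorante",
--                                "perfume","cosmet","cabelo","pele","maquiagem"]):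
--         return "Higiene"
--     if any(w in txt for w in ["limpeza","detergente","sabao","desinfet","alvejante",
--                                "amaciante","multiuso","esponja"]):
--         return "Limpeza"
--     if any(w in txt for w in ["medic","farmac","suplement","vitam","mineral","proteina"]):
--         return "Medicamentos"
--     return "Alimentos"
-- ===== SOURCE B (Python) =====
-- # Text-driven multi-pattern scan: walk txt position by position, check which
-- # keyword starts at each position via a flat keyword->rank map, and keep the
-- # minimal category rank; no per-category any()/`in` membership passes.
-- _KEYWORDS = {}
-- for _rank, _words in enumerate([
--     ["bebida","drink","juice","soda","refrigerante","suco","agua",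
--      "cerveja","vinho","leite","cha","cafe","iogurte","achocolatado"],
--     ["higiene","sabonete","shampoo","creme","dental","desodorante",
--      "perfume","cosmet","cabelo","pele","maquiagem"],
--     ["limpeza","detergente","sabao","desinfet","alvejante",
--      "amaciante","multiuso","esponja"],
--     ["medic","farmac","suplement","vitam","mineral","proteina"],
-- ]):
--     for _w in _words:
--         _KEYWORDS[_w] = _rank
--
-- _LABELS = ["Bebidas", "Higiene", "Limpeza", "Medicamentos"]
--
--
-- def _categoria(cats: str) -> str:
--     if not cats:
--         return "Alimentos"
--     txt = " ".join(p.split(":")[-1] for p in cats.replace(",", ";").split(";")).lower()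
--     best = 4  # 4 = no keyword seen yet
--     for i in range(len(txt)):
--         for w, rank in _KEYWORDS.items():
--             if rank < best and txt.startswith(w, i):
--                 best = rank
--     return _LABELS[best] if best < 4 else "Alimentos"
-- ===== Notes on version B (the rewrite author's own statement) =====
-- stated objective: alternative
-- what changed: Instead of four per-category any(`w in txt`) membership passes, B scans txt position by position, testing which keywords of a flat keyword->rank map start at each position (txt.startswith(w, i)) and keeping the minimal category rank, then maps the rank to its label.
import Mathlib
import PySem

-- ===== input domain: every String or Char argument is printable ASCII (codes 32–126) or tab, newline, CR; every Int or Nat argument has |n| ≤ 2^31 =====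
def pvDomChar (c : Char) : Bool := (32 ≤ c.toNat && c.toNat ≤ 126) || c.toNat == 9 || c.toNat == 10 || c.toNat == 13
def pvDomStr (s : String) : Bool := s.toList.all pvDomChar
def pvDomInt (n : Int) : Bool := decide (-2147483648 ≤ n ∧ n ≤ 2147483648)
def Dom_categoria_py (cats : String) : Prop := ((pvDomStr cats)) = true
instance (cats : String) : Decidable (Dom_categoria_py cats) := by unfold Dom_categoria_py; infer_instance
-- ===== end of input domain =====

-- B replaces A's four per-category any(`w in txt`) membership passes by a text-driven scan: one pass over the positions of txt, testing which keyword starts at each position via a flat keyword->rank map and keeping the minimal category rank (alternative algorithm, same cost class).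


-- ===== PORT A =====
-- shared preprocessing line, identical in both Pythons:
-- txt = " ".join(p.split(":")[-1] for p in cats.replace(",",";").split(";")).lower()
-- (separators are nonempty literals, so split? is always some and split(":") nonempty: the .getD defaults never fire)
def pvTxt (cats : String) : String :=
  PySem.Str.lower (PySem.Str.join " "
    (((PySem.Str.split? (PySem.Str.replace cats "," ";") ";").getD []).map
      (fun p => (PySem.List.pyGet? ((PySem.Str.split? p ":").getD []) (-1)).getD "")))

def categoria_py (cats : String) : String :=
  if cats = "" then "Alimentos"
  else
    let txt := pvTxt cats
    if (["bebida","drink","juice","soda","refrigerante","suco","agua",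
         "cerveja","vinho","leite","cha","cafe","iogurte","achocolatado"]).any
        (fun w => PySem.Str.isIn w txt) then "Bebidas"
    else if (["higiene","sabonete","shampoo","creme","dental","desodorante",
              "perfume","cosmet","cabelo","pele","maquiagem"]).any
        (fun w => PySem.Str.isIn w txt) then "Higiene"
    else if (["limpeza","detergente","sabao","desinfet","alvejante",
              "amaciante","multiuso","esponja"]).any
        (fun w => PySem.Str.isIn w txt) then "Limpeza"
    else if (["medic","farmac","suplement","vitam","mineral","proteina"]).any
        (fun w => PySem.Str.isIn w txt) then "Medicamentos"
    else "Alimentos"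

-- ===== PORT B =====
-- flat keyword -> category-rank map (_KEYWORDS, insertion order) and _LABELS
def pvKw : List (String × Nat) :=
  [("bebida",0),("drink",0),("juice",0),("soda",0),("refrigerante",0),("suco",0),("agua",0),
   ("cerveja",0),("vinho",0),("leite",0),("cha",0),("cafe",0),("iogurte",0),("achocolatado",0),
   ("higiene",1),("sabonete",1),("shampoo",1),("creme",1),("dental",1),("desodorante",1),
   ("perfume",1),("cosmet",1),("cabelo",1),("pele",1),("maquiagem",1),
   ("limpeza",2),("detergente",2),("sabao",2),("desinfet",2),("alvejante",2),
   ("amaciante",2),("multiuso",2),("esponja",2),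
   ("medic",3),("farmac",3),("suplement",3),("vitam",3),("mineral",3),("proteina",3)]

def pvLabels : List String := ["Bebidas", "Higiene", "Limpeza", "Medicamentos"]

-- the double loop: for i in range(len(txt)): for w, rank in _KEYWORDS.items(): ...
-- Python's txt.startswith(w, i) with 0 <= i is exactly `w is a prefix of txt[i:]`:
-- ported as PySem.Chars.startswith on (txt.toList.drop i).
def pvBest (txt : String) : Nat :=
  (List.range txt.toList.length).foldl
    (fun best i =>
      pvKw.foldl
        (fun best wp =>
          if wp.2 < best && PySem.Chars.startswith (txt.toList.drop i) wp.1.toList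
          then wp.2 else best)
        best)
    4

def categoria_py_alt (cats : String) : String :=
  if cats = "" then "Alimentos"
  else
    let best := pvBest (pvTxt cats)
    if best < 4 then (PySem.List.pyGet? pvLabels (best : Int)).getD "" else "Alimentos"

-- ===== PRECONDITION & SPEC =====
def Spec_categoria_py (cats : String) (out : String) : Prop := out = categoria_py_alt cats
instance (cats : String) (out : String) : Decidable (Spec_categoria_py cats out) := by unfold Spec_categoria_py; infer_instance

-- ===== CLAIM (what is proved, stated in full; the proofs are below) =====
def Claim_equal_categoria_py : Prop := ∀ (cats : String), Dom_categoria_py cats → Spec_categoria_py cats (categoria_py cats)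

-- ===== LEMMAS AND PROOFS =====

-- all matched ranks: for each text position, the ranks of the keywords starting there
def pvRanks (txt : String) : List Nat :=
  (List.range txt.toList.length).flatMap
    (fun i => (pvKw.filter
        (fun wp => PySem.Chars.startswith (txt.toList.drop i) wp.1.toList)).map Prod.snd)

-- the guarded update is a conditional min
theorem pv_step_min (p : String → Bool) (b : Nat) (wp : String × Nat) :
    (if wp.2 < b && p wp.1 then wp.2 else b) = (if p wp.1 then min b wp.2 else b) := by
  cases h : p wp.1
  · simp
  · simp only [Bool.and_true, decide_eq_true_eq, Nat.min_def, if_true]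
    split_ifs <;> omega

-- inner loop = foldl min over the matched ranks at one position
theorem pv_inner_min_aux (p : String → Bool) :
    ∀ (kw : List (String × Nat)) (b : Nat),
      kw.foldl (fun b wp => if p wp.1 then min b wp.2 else b) b
        = ((kw.filter (fun wp => p wp.1)).map Prod.snd).foldl min b := by
  intro kw
  induction kw with
  | nil => intro b; rfl
  | cons wp rest ih =>
      intro b
      simp only [List.foldl_cons, List.filter_cons]
      cases h : p wp.1 <;> simp [ih]

theorem pv_inner_min (p : String → Bool) (kw : List (String × Nat)) (b : Nat) :
    kw.foldl (fun b wp => if wp.2 < b && p wp.1 then wp.2 else b) b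
      = ((kw.filter (fun wp => p wp.1)).map Prod.snd).foldl min b := by
  have hf : (fun (b : Nat) (wp : String × Nat) => if wp.2 < b && p wp.1 then wp.2 else b)
      = (fun (b : Nat) (wp : String × Nat) => if p wp.1 then min b wp.2 else b) := by
    funext b wp; exact pv_step_min p b wp
  rw [hf]
  exact pv_inner_min_aux p kw b

-- outer loop of per-position min-folds = one min-fold over the flattened ranks
theorem pv_outer_flat (f : Nat → List Nat) :
    ∀ (idxs : List Nat) (b : Nat),
      idxs.foldl (fun b i => (f i).foldl min b) b = (idxs.flatMap f).foldl min b := by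
  intro idxs
  induction idxs with
  | nil => intro b; rfl
  | cons i rest ih => intro b; simp [List.foldl_append, ih]

theorem pvBest_eq (txt : String) : pvBest txt = (pvRanks txt).foldl min 4 := by
  unfold pvBest pvRanks
  have hfun : (fun (best : Nat) (i : Nat) =>
      pvKw.foldl (fun best wp =>
        if wp.2 < best && PySem.Chars.startswith (txt.toList.drop i) wp.1.toList
        then wp.2 else best) best)
      = (fun (best : Nat) (i : Nat) =>
        ((pvKw.filter (fun wp =>
            PySem.Chars.startswith (txt.toList.drop i) wp.1.toList)).map Prod.snd).foldl
          min best) := by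
    funext best i
    exact pv_inner_min (fun w => PySem.Chars.startswith (txt.toList.drop i) w.toList) pvKw best
  rw [hfun, pv_outer_flat]

theorem pv_foldl_min_le_init : ∀ (R : List Nat) (b : Nat), R.foldl min b ≤ b := by
  intro R
  induction R with
  | nil => intro b; simp
  | cons x rest ih =>
      intro b
      calc (x :: rest).foldl min b ≤ min b x := ih (min b x)
        _ ≤ b := Nat.min_le_left _ _

theorem pv_foldl_min_le_mem : ∀ (R : List Nat) (b x : Nat), x ∈ R → R.foldl min b ≤ x := by
  intro R
  induction R with
  | nil => intro b x hx; cases hx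
  | cons y rest ih =>
      intro b x hx
      rcases List.mem_cons.mp hx with h | h
      · subst h
        calc (x :: rest).foldl min b ≤ min b x := pv_foldl_min_le_init rest (min b x)
          _ ≤ x := Nat.min_le_right _ _
      · exact ih (min b y) x h

theorem pv_foldl_min_mem_or : ∀ (R : List Nat) (b : Nat), R.foldl min b = b ∨ R.foldl min b ∈ R := by
  intro R
  induction R with
  | nil => intro b; left; rfl
  | cons y rest ih =>
      intro b
      rcases ih (min b y) with h | h
      · rcases Nat.le_total b y with hby | hyb
        · left; rw [List.foldl_cons, h]; exact Nat.min_eq_left hby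
        · right; rw [List.foldl_cons, h, Nat.min_eq_right hyb]
          exact List.mem_cons_self
      · right; rw [List.foldl_cons]; exact List.mem_cons_of_mem y h

-- a nonempty keyword occurs in txt iff it starts at some position of txt
theorem pv_occurs_iff (w txt : String) (hw : w.toList ≠ []) :
    (∃ i, i < txt.toList.length ∧
        PySem.Chars.startswith (txt.toList.drop i) w.toList = true)
      ↔ PySem.Str.isIn w txt = true := by
  rw [PySem.Str.isIn_iff_infix, ← PySem.Chars.isIn_iff_infix,
    ← PySem.Chars.exists_prefix_drop_iff_isIn]
  constructor
  · rintro ⟨i, _, hs⟩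
    exact ⟨i, (PySem.Chars.startswith_iff _ _).mp hs⟩
  · rintro ⟨j, hj⟩
    by_cases hlt : j < txt.toList.length
    · exact ⟨j, hlt, (PySem.Chars.startswith_iff _ _).mpr hj⟩
    · exfalso
      have : txt.toList.drop j = [] := List.drop_eq_nil_of_le (Nat.le_of_not_lt hlt)
      rw [this] at hj
      exact hw (List.prefix_nil.mp hj)

theorem pv_kw_nonempty : ∀ wp ∈ pvKw, wp.1.toList ≠ [] := by decide

theorem pv_mem_ranks_iff (txt : String) (r : Nat) :
    r ∈ pvRanks txt ↔ ∃ wp ∈ pvKw, wp.2 = r ∧ PySem.Str.isIn wp.1 txt = true := by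
  unfold pvRanks
  simp only [List.mem_flatMap, List.mem_range, List.mem_map, List.mem_filter]
  constructor
  · rintro ⟨i, hi, wp, ⟨hmem, hs⟩, hr⟩
    exact ⟨wp, hmem, hr,
      (pv_occurs_iff wp.1 txt (pv_kw_nonempty wp hmem)).mp ⟨i, hi, hs⟩⟩
  · rintro ⟨wp, hmem, hr, hin⟩
    rcases (pv_occurs_iff wp.1 txt (pv_kw_nonempty wp hmem)).mpr hin with ⟨i, hi, hs⟩
    exact ⟨i, hi, wp, ⟨hmem, hs⟩, hr⟩

theorem pv_ranks_le (txt : String) (r : Nat) (h : r ∈ pvRanks txt) : r ≤ 3 := by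
  rcases (pv_mem_ranks_iff txt r).mp h with ⟨wp, hmem, hr, _⟩
  have h3 : ∀ wp ∈ pvKw, wp.2 ≤ 3 := by decide
  exact hr ▸ h3 wp hmem

-- rank r is matched iff A's r-th keyword list has a hit
theorem pv_rank0_iff (txt : String) :
    0 ∈ pvRanks txt ↔ ((["bebida","drink","juice","soda","refrigerante","suco","agua",
      "cerveja","vinho","leite","cha","cafe","iogurte","achocolatado"]).any
        (fun w => PySem.Str.isIn w txt)) = true := by
  rw [pv_mem_ranks_iff]; simp [pvKw]

theorem pv_rank1_iff (txt : String) :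
    1 ∈ pvRanks txt ↔ ((["higiene","sabonete","shampoo","creme","dental","desodorante",
      "perfume","cosmet","cabelo","pele","maquiagem"]).any
        (fun w => PySem.Str.isIn w txt)) = true := by
  rw [pv_mem_ranks_iff]; simp [pvKw]

theorem pv_rank2_iff (txt : String) :
    2 ∈ pvRanks txt ↔ ((["limpeza","detergente","sabao","desinfet","alvejante",
      "amaciante","multiuso","esponja"]).any
        (fun w => PySem.Str.isIn w txt)) = true := by
  rw [pv_mem_ranks_iff]; simp [pvKw]

theorem pv_rank3_iff (txt : String) :
    3 ∈ pvRanks txt ↔ ((["medic","farmac","suplement","vitam","mineral","proteina"]).any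
        (fun w => PySem.Str.isIn w txt)) = true := by
  rw [pv_mem_ranks_iff]; simp [pvKw]

-- ===== VERDICT (by name: the statement is the Claim_ definition above) =====
theorem categoria_py_spec : Claim_equal_categoria_py := by
  intro cats _
  unfold Spec_categoria_py categoria_py categoria_py_alt
  by_cases h : cats = ""
  · simp [h]
  · simp only [h, if_false]
    set txt := pvTxt cats with htxt
    rw [pvBest_eq]
    set best := (pvRanks txt).foldl min 4 with hbest
    have hinit : best ≤ 4 := pv_foldl_min_le_init _ _
    have hmemor : best = 4 ∨ best ∈ pvRanks txt := pv_foldl_min_mem_or (pvRanks txt) 4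
    by_cases h0 : 0 ∈ pvRanks txt
    · have hb : best = 0 := Nat.le_zero.mp (pv_foldl_min_le_mem _ _ _ h0)
      rw [if_pos ((pv_rank0_iff txt).mp h0), hb]
      decide
    · have n0 : ¬ ((["bebida","drink","juice","soda","refrigerante","suco","agua",
          "cerveja","vinho","leite","cha","cafe","iogurte","achocolatado"]).any
            (fun w => PySem.Str.isIn w txt)) = true :=
        fun hc => h0 ((pv_rank0_iff txt).mpr hc)
      rw [if_neg n0]
      by_cases h1 : 1 ∈ pvRanks txt
      · have hle : best ≤ 1 := pv_foldl_min_le_mem _ _ _ h1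
        have hb : best = 1 := by
          rcases hmemor with h4 | hm
          · omega
          · have h3 := pv_ranks_le txt best hm
            interval_cases best
            · exact absurd hm h0
            · rfl
        rw [if_pos ((pv_rank1_iff txt).mp h1), hb]
        decide
      · have n1 : ¬ ((["higiene","sabonete","shampoo","creme","dental","desodorante",
            "perfume","cosmet","cabelo","pele","maquiagem"]).any
              (fun w => PySem.Str.isIn w txt)) = true :=
          fun hc => h1 ((pv_rank1_iff txt).mpr hc)
        rw [if_neg n1]
        by_cases h2 : 2 ∈ pvRanks txt
        · have hle : best ≤ 2 := pv_foldl_min_le_mem _ _ _ h2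
          have hb : best = 2 := by
            rcases hmemor with h4 | hm
            · omega
            · have h3 := pv_ranks_le txt best hm
              interval_cases best
              · exact absurd hm h0
              · exact absurd hm h1
              · rfl
          rw [if_pos ((pv_rank2_iff txt).mp h2), hb]
          decide
        · have n2 : ¬ ((["limpeza","detergente","sabao","desinfet","alvejante",
              "amaciante","multiuso","esponja"]).any
                (fun w => PySem.Str.isIn w txt)) = true :=
            fun hc => h2 ((pv_rank2_iff txt).mpr hc)
          rw [if_neg n2]
          by_cases h3 : 3 ∈ pvRanks txt
          · have hle : best ≤ 3 := pv_foldl_min_le_mem _ _ _ h3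
            have hb : best = 3 := by
              rcases hmemor with h4 | hm
              · omega
              · have hr3 := pv_ranks_le txt best hm
                interval_cases best
                · exact absurd hm h0
                · exact absurd hm h1
                · exact absurd hm h2
                · rfl
            rw [if_pos ((pv_rank3_iff txt).mp h3), hb]
            decide
          · have n3 : ¬ ((["medic","farmac","suplement","vitam","mineral","proteina"]).any
                (fun w => PySem.Str.isIn w txt)) = true :=
              fun hc => h3 ((pv_rank3_iff txt).mpr hc)
            rw [if_neg n3]
            have hb : best = 4 := by
              rcases hmemor with h4 | hm
              · exact h4
              · have hr3 := pv_ranks_le txt best hm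
                interval_cases best
                · exact absurd hm h0
                · exact absurd hm h1
                · exact absurd hm h2
                · exact absurd hm h3
            rw [hb]
            decide
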